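-- pv_equiv track=rewrite | github.com/acorrenson/Logik | evaluator.py | make_env
-- ===== SOURCE A (Python) =====
-- from itertools import product
--
-- def make_env(var_list):
--     """Build a truth table for an expression"""
--     tab = list(product([0, 1], repeat=len(var_list)))
--     env_list = []
--     for lines in tab:
--         env = {}
--         for i, v in enumerate(var_list):
--             env[v] = lines[i]
--         env_list.append(env)
--     return (env_list, tab)
-- ===== SOURCE B (Python) =====
-- def make_env(var_list):
--     """Build a truth table for an expression"""
--     pairs = [({}, ())]
--     for v in var_list:
--         pairs = [({**e, v: b}, r + (b,)) for e, r in pairs for b in (0, 1)]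
--     return ([e for e, _ in pairs], [r for _, r in pairs])
-- ===== Notes on version B (the rewrite author's own statement) =====
-- stated objective: alternative
-- what changed: B builds the (env, row) table incrementally with one fold over the variables, doubling the table by appending bit 0 then 1 to every row, instead of materializing the full itertools.product first and then re-scanning each row with enumerate to build its dict.
import Mathlib
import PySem

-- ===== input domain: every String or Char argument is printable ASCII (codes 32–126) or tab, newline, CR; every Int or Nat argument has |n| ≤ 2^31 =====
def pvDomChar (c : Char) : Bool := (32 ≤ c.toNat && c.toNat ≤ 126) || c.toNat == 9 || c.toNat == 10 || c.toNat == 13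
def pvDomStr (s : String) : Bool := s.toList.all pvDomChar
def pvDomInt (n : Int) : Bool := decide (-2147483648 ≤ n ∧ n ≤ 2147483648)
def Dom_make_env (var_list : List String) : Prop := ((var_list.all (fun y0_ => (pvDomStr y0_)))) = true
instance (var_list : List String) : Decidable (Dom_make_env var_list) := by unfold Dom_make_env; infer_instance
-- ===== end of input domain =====

-- B builds the table incrementally (one fold over the variables, extending every row with 0 then 1)
-- instead of materializing the full product first and re-scanning each row; objective: alternative decomposition.

-- ===== PORT A =====
-- product([0, 1], repeat=n): leftmost coordinate varies slowest
def prodBits : Nat → List (List Int)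
  | 0 => [([] : List Int)]
  | n + 1 => ([0, 1] : List Int).flatMap (fun b => (prodBits n).map (fun t => b :: t))

-- lines[i] is always in range (each row of prodBits has length var_list.length), so pyGetD's default is never used
def make_env (var_list : List String) : (List (List (String × Int))) × List (List Int) :=
  let tab := prodBits var_list.length
  let env_list := tab.map (fun lines =>
    ((PySem.List.enumerate var_list).foldl
      (fun env iv => PySem.Dict.insert env iv.2 (PySem.List.pyGetD lines iv.1 0))
      (PySem.Dict.empty : PySem.Dict String Int)).items)
  (env_list, tab)

-- ===== PORT B =====
def make_env_alt (var_list : List String) : (List (List (String × Int))) × List (List Int) :=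
  let pairs := var_list.foldl
    (fun ps v => ps.flatMap (fun er =>
      [(PySem.Dict.insert er.1 v 0, er.2 ++ [(0 : Int)]),
       (PySem.Dict.insert er.1 v 1, er.2 ++ [(1 : Int)])]))
    [((PySem.Dict.empty : PySem.Dict String Int), ([] : List Int))]
  (pairs.map (fun er => er.1.items), pairs.map (fun er => er.2))

-- ===== PRECONDITION & SPEC =====
def Spec_make_env (var_list : List String) (out : (List (List (String × Int))) × List (List Int)) : Prop := out = make_env_alt var_list
instance (var_list : List String) (out : (List (List (String × Int))) × List (List Int)) : Decidable (Spec_make_env var_list out) := by unfold Spec_make_env; infer_instance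

-- ===== CLAIM (what is proved, stated in full; the proofs are below) =====
def Claim_equal_make_env : Prop := ∀ (var_list : List String), Dom_make_env var_list → Spec_make_env var_list (make_env var_list)

-- ===== LEMMAS AND PROOFS =====

-- A's env-building inner loop, as a named function
def envOf (vs : List String) (lines : List Int) : PySem.Dict String Int :=
  (PySem.List.enumerate vs).foldl
    (fun env iv => PySem.Dict.insert env iv.2 (PySem.List.pyGetD lines iv.1 0))
    (PySem.Dict.empty : PySem.Dict String Int)

theorem length_mem_prodBits {n : Nat} {r : List Int} (h : r ∈ prodBits n) : r.length = n := by
  induction n generalizing r with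
  | zero => simp [prodBits] at h; simp [h]
  | succ n ih =>
    simp [prodBits] at h
    rcases h with ⟨t, ht, rfl⟩ | ⟨t, ht, rfl⟩ <;> simp [ih ht]

theorem prodBits_succ_eq (n : Nat) :
    prodBits (n + 1) = ([0, 1] : List Int).flatMap (fun b => (prodBits n).map (fun t => b :: t)) := rfl

-- the product extended on the RIGHT: each row gets 0 then 1 appended
theorem prodBits_succ_snoc (n : Nat) :
    prodBits (n + 1) = (prodBits n).flatMap (fun r => [r ++ [(0 : Int)], r ++ [(1 : Int)]]) := by
  induction n with
  | zero => simp [prodBits]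
  | succ n ih =>
    conv_lhs => rw [prodBits_succ_eq, ih]
    rw [prodBits_succ_eq, List.flatMap_assoc]
    simp [List.map_flatMap, List.flatMap_map]

-- extending the variable list by one: the env gains one insert
theorem envOf_snoc (vs : List String) (v : String) (r : List Int) (b : Int)
    (hlen : r.length = vs.length) :
    envOf (vs ++ [v]) (r ++ [b]) = PySem.Dict.insert (envOf vs r) v b := by
  unfold envOf
  rw [PySem.List.enumerate_append, List.foldl_append]
  have hpref : (PySem.List.enumerate vs).foldl
      (fun env iv => PySem.Dict.insert env iv.2 (PySem.List.pyGetD (r ++ [b]) iv.1 0))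
      (PySem.Dict.empty : PySem.Dict String Int)
      = (PySem.List.enumerate vs).foldl
      (fun env iv => PySem.Dict.insert env iv.2 (PySem.List.pyGetD r iv.1 0))
      (PySem.Dict.empty : PySem.Dict String Int) := by
    apply PySem.List.foldl_congr_mem
    intro acc iv hiv
    rcases (PySem.List.mem_enumerate_iff _ _ _).1 hiv with ⟨k, hk, rfl⟩
    have hk' : k < r.length := by omega
    have h0 : (0 : Int) + (k : Int) = ((k : Nat) : Int) := by omega
    simp only [h0, PySem.List.pyGetD_natCast]
    congr 1
    rw [List.getD_eq_getElem?_getD, List.getD_eq_getElem?_getD, List.getElem?_append_left hk']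
  rw [hpref]
  simp only [PySem.List.enumerate_cons, PySem.List.enumerate_nil, List.foldl_cons, List.foldl_nil]
  congr 1
  have h1 : (0 : Int) + (vs.length : Int) = ((r.length : Nat) : Int) := by
    rw [hlen]; omega
  rw [h1, PySem.List.pyGetD_natCast, List.getD_eq_getElem?_getD,
    List.getElem?_append_right (le_refl _)]
  simp only [Nat.sub_self, List.getElem?_cons_zero, Option.getD_some]

theorem pairs_invariant (vs : List String) :
    vs.foldl
      (fun ps v => ps.flatMap (fun er =>
        [(PySem.Dict.insert er.1 v 0, er.2 ++ [(0 : Int)]),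
         (PySem.Dict.insert er.1 v 1, er.2 ++ [(1 : Int)])]))
      [((PySem.Dict.empty : PySem.Dict String Int), ([] : List Int))]
    = (prodBits vs.length).map (fun r => (envOf vs r, r)) := by
  induction vs using List.reverseRecOn with
  | nil => simp [prodBits, envOf]
  | append_singleton vs v ih =>
    rw [List.foldl_append, ih]
    simp only [List.foldl_cons, List.foldl_nil, List.length_append, List.length_singleton]
    rw [prodBits_succ_snoc, List.flatMap_map, List.map_flatMap]
    apply List.flatMap_congr
    intro r hr
    have hlen : r.length = vs.length := length_mem_prodBits hr
    simp [envOf_snoc vs v r _ hlen]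

-- ===== VERDICT (by name: the statement is the Claim_ definition above) =====
theorem make_env_spec : Claim_equal_make_env := by
  intro vs _
  show make_env vs = make_env_alt vs
  unfold make_env make_env_alt
  rw [pairs_invariant]
  simp only [List.map_map]
  refine Prod.ext ?_ ?_
  · simp [envOf]
  · simp [Function.comp_def]
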